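-- pv_equiv track=rewrite | github.com/yang920428/AL_midterm | real/src/plot_laser.py | split_cycles
-- ===== SOURCE A (Python) =====
-- def split_cycles(data):
--     """
--     將資料依照角度由小變大（遇到角度變小就代表新一圈）來分段。
--     """
--     cycles = []
--     current_cycle = []
--     last_angle = -1
--
--     for angle, distance in data:
--         if angle < last_angle:
--             # 進入新一圈
--             if current_cycle:
--                 cycles.append(current_cycle)
--                 current_cycle = []
--         current_cycle.append((angle, distance))
--         last_angle = angle
--
--     if current_cycle:
--         cycles.append(current_cycle)
--     return cycles
-- ===== SOURCE B (Python) =====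
-- def split_cycles(data):
--     """
--     將資料依照角度由小變大（遇到角度變小就代表新一圈）來分段。
--     Builds the cycle list back-to-front: traverse the points in reverse and
--     prepend each point either to the front cycle (if the angle does not drop
--     going forward) or as a new cycle.
--     """
--     cycles = []
--     for angle, distance in reversed(list(data)):
--         if cycles and angle <= cycles[0][0][0]:
--             cycles[0].insert(0, (angle, distance))
--         else:
--             cycles.insert(0, [(angle, distance)])
--     return cycles
-- ===== Notes on version B (the rewrite author's own statement) =====
-- stated objective: alternative
-- what changed: B builds the cycle list back-to-front in one reverse traversal, deciding per point whether it joins the front cycle by comparing with that cycle's head, instead of A's forward accumulation with a mutable current cycle and a last-angle register.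
import Mathlib
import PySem

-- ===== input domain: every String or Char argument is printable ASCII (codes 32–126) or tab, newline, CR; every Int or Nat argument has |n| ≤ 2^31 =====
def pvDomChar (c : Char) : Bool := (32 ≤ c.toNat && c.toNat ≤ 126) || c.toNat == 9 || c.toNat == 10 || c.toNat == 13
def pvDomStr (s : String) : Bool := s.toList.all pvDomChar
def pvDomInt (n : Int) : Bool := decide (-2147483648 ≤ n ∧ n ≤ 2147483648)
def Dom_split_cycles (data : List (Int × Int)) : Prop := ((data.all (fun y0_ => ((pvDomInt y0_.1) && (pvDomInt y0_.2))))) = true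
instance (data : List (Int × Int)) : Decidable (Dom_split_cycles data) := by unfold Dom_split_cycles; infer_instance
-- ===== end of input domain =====

-- B rebuilds the cycle list back-to-front in one reverse traversal (alternative decomposition, same results).


-- ===== PORT A =====
-- the loop of A: state = (cycles, current_cycle, last_angle)
def splitGo : List (Int × Int) → List (List (Int × Int)) → List (Int × Int) → Int → List (List (Int × Int))
  | [], cycles, cur, _ => if cur = [] then cycles else cycles ++ [cur]
  | (a, d) :: rest, cycles, cur, last =>
    if a < last then
      if cur ≠ [] then splitGo rest (cycles ++ [cur]) [(a, d)] a  -- current_cycle reset to [] then (a,d) appended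
      else splitGo rest cycles (cur ++ [(a, d)]) a
    else splitGo rest cycles (cur ++ [(a, d)]) a

def split_cycles (data : List (Int × Int)) : List (List (Int × Int)) :=
  splitGo data [] [] (-1)

-- ===== PORT B =====
-- one step of B's reverse traversal: p is prepended into cycles
def stepB (p : Int × Int) : List (List (Int × Int)) → List (List (Int × Int))
  | [] => [[p]]
  | (q :: c) :: cs => if p.1 ≤ q.1 then (p :: q :: c) :: cs else [p] :: (q :: c) :: cs
  | [] :: cs => [p] :: [] :: cs  -- unreachable: built cycles are never empty

def split_cycles_alt (data : List (Int × Int)) : List (List (Int × Int)) :=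
  data.foldr stepB []

-- ===== PRECONDITION & SPEC =====
def Spec_split_cycles (data : List (Int × Int)) (out : List (List (Int × Int))) : Prop := out = split_cycles_alt data
instance (data : List (Int × Int)) (out : List (List (Int × Int))) : Decidable (Spec_split_cycles data out) := by unfold Spec_split_cycles; infer_instance

-- ===== CLAIM (what is proved, stated in full; the proofs are below) =====
def Claim_equal_split_cycles : Prop := ∀ (data : List (Int × Int)), Dom_split_cycles data → Spec_split_cycles data (split_cycles data)

-- ===== LEMMAS AND PROOFS =====

-- glue cur last acc: A's remaining behaviour given a nonempty current cycle `cur`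
-- with last angle `last`, where acc is B's result for the remaining input.
def glue (cur : List (Int × Int)) (last : Int) : List (List (Int × Int)) → List (List (Int × Int))
  | [] => [cur]
  | (q :: c) :: cs => if q.1 < last then cur :: (q :: c) :: cs else (cur ++ q :: c) :: cs
  | [] :: cs => [cur] ++ [] :: cs  -- unreachable

theorem splitGo_acc (data : List (Int × Int)) :
    ∀ (cycles : List (List (Int × Int))) (cur : List (Int × Int)) (last : Int),
    splitGo data cycles cur last = cycles ++ splitGo data [] cur last := by
  induction data with
  | nil => intro cycles cur last; simp [splitGo]; split <;> simp
  | cons p rest ih =>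
    intro cycles cur last
    obtain ⟨a, d⟩ := p
    simp only [splitGo, List.nil_append]
    by_cases h1 : a < last
    · by_cases h2 : cur ≠ []
      · simp only [if_pos h1, if_pos h2]
        rw [ih (cycles ++ [cur]), ih [cur]]; simp [List.append_assoc]
      · simp only [if_pos h1, if_neg h2]
        exact ih cycles _ _
    · simp only [if_neg h1]
      exact ih cycles _ _

theorem alt_no_empty (data : List (Int × Int)) : [] ∉ split_cycles_alt data := by
  induction data with
  | nil => simp [split_cycles_alt]
  | cons p rest ih =>
    simp only [split_cycles_alt, List.foldr] at *
    cases h : List.foldr stepB [] rest with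
    | nil => simp [stepB]
    | cons c cs =>
      rw [h] at ih
      cases c with
      | nil => exact absurd (by simp) ih
      | cons q c' =>
        simp only [stepB]
        split <;> simp_all

theorem go_glue (data : List (Int × Int)) :
    ∀ (cur : List (Int × Int)) (last : Int), cur ≠ [] →
    splitGo data [] cur last = glue cur last (split_cycles_alt data) := by
  induction data with
  | nil => intro cur last h; simp [splitGo, split_cycles_alt, glue, h]
  | cons p rest ih =>
    intro cur last hcur
    obtain ⟨a, d⟩ := p
    have hne := alt_no_empty rest
    have halt : split_cycles_alt ((a, d) :: rest) = stepB (a, d) (split_cycles_alt rest) := rfl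
    simp only [splitGo, hcur, if_pos, ne_eq, not_false_eq_true, halt]
    cases hacc : split_cycles_alt rest with
    | nil =>
      by_cases hlt : a < last
      · simp only [if_pos hlt]
        rw [splitGo_acc, ih [(a, d)] a (by simp), hacc]
        simp [glue, stepB, hlt]
      · simp only [if_neg hlt]
        rw [ih (cur ++ [(a, d)]) a (by simp), hacc]
        simp [glue, stepB, hlt]
    | cons c cs =>
      rw [hacc] at hne
      cases c with
      | nil => exact absurd (by simp) hne
      | cons q c' =>
        by_cases hlt : a < last
        · simp only [if_pos hlt]
          rw [splitGo_acc, ih [(a, d)] a (by simp), hacc]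
          by_cases hq : a ≤ q.1
          · have : ¬ q.1 < a := by omega
            simp [glue, stepB, hlt, hq, this]
          · have : q.1 < a := by omega
            simp [glue, stepB, hlt, hq, this]
        · simp only [if_neg hlt]
          rw [ih (cur ++ [(a, d)]) a (by simp), hacc]
          by_cases hq : a ≤ q.1
          · have : ¬ q.1 < a := by omega
            simp [glue, stepB, hlt, hq, this]
          · have : q.1 < a := by omega
            simp [glue, stepB, hlt, hq, this]

-- ===== VERDICT (by name: the statement is the Claim_ definition above) =====
theorem split_cycles_spec : Claim_equal_split_cycles := by
  intro data _
  unfold Spec_split_cycles split_cycles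
  cases data with
  | nil => rfl
  | cons p rest =>
    obtain ⟨a, d⟩ := p
    have h1 : splitGo ((a, d) :: rest) [] [] (-1) = splitGo rest [] [(a, d)] a := by
      simp only [splitGo]; split <;> simp
    rw [h1, go_glue rest [(a, d)] a (by simp)]
    have hne := alt_no_empty rest
    have halt : split_cycles_alt ((a, d) :: rest) = stepB (a, d) (split_cycles_alt rest) := rfl
    rw [halt]
    cases hacc : split_cycles_alt rest with
    | nil => simp [glue, stepB]
    | cons c cs =>
      rw [hacc] at hne
      cases c with
      | nil => exact absurd (by simp) hne
      | cons q c' =>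
        by_cases hq : a ≤ q.1
        · have : ¬ q.1 < a := by omega
          simp [glue, stepB, hq, this]
        · have : q.1 < a := by omega
          simp [glue, stepB, hq, this]
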